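-- pv_equiv track=rewrite | github.com/oernster/calendifier | api_server.py | normalize_translation_keys
-- ===== SOURCE A (Python) =====
-- def normalize_translation_keys(translations):
--     """Normalize translation keys to support both dot notation and flattened keys"""
--     normalized = {}
--
--     def flatten_dict(d, parent_key='', sep='_'):
--         items = []
--         for k, v in d.items():
--             new_key = f"{parent_key}{sep}{k}" if parent_key else k
--             if isinstance(v, dict):
--                 items.extend(flatten_dict(v, new_key, sep=sep).items())
--             else:
--                 items.append((new_key, v))
--         return dict(items)
--
--     # Add original keys
--     normalized.update(translations)
--
--     # Add flattened keys (dot notation to underscore)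
--     flattened = flatten_dict(translations, sep='_')
--     normalized.update(flattened)
--
--     # Add dot notation keys (underscore to dot)
--     for key, value in list(normalized.items()):
--         if '_' in key:
--             dot_key = key.replace('_', '.')
--             normalized[dot_key] = value
--
--     return normalized
-- ===== SOURCE B (Python) =====
-- def normalize_translation_keys(translations):
--     """Normalize translation keys to support both dot notation and flattened keys.
--
--     For string-valued translations there is nothing to flatten, so a single
--     pass suffices: copy the dict, then add a dot-notation alias for every
--     key that contains an underscore."""
--     normalized = dict(translations)
--     for key, value in translations.items():
--         if '_' in key:
--             normalized[key.replace('_', '.')] = value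
--     return normalized
-- ===== Notes on version B (the rewrite author's own statement) =====
-- stated objective: simpler
-- what changed: Drops the recursive flatten_dict helper and the two redundant dict merges (for string-valued translations flattening is the identity) and does one dict copy plus one pass adding dot-notation aliases.
import Mathlib
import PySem

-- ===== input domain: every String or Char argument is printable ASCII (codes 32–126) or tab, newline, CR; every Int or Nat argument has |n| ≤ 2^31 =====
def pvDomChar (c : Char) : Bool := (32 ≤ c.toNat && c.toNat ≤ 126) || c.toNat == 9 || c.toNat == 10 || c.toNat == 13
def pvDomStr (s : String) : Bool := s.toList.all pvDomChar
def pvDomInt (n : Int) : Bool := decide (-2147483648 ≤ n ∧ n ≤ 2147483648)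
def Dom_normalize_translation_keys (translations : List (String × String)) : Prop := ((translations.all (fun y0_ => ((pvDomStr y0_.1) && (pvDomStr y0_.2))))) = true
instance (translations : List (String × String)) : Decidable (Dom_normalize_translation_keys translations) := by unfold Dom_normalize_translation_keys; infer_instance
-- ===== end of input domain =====

-- B drops the recursive flatten_dict helper and the two redundant merges (flattening a
-- str-valued dict is the identity): one dict copy plus one pass adding dot-notation aliases.

-- ===== PORT A =====
-- flatten_dict(d, parent_key='', sep='_'): values are typed str here, so the
-- isinstance(v, dict) branch can never fire; only the append branch is ported.
def pvFlattenDict (d : PySem.Dict String String) (parent_key : String) (sep : String) :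
    PySem.Dict String String :=
  PySem.Dict.ofList (d.items.foldl (fun items kv =>
    let new_key := if parent_key ≠ "" then PySem.Str.join "" [parent_key, sep, kv.1] else kv.1
    items ++ [(new_key, kv.2)]) [])

def normalize_translation_keys (translations : List (String × String)) : List (String × String) :=
  let tdict := PySem.Dict.ofList translations              -- the dict argument
  let normalized := PySem.Dict.update PySem.Dict.empty tdict.items   -- normalized = {}; normalized.update(translations)
  let flattened := pvFlattenDict tdict "" "_"              -- flatten_dict(translations, sep='_')
  let normalized := normalized.update flattened.items      -- normalized.update(flattened)
  let normalized := normalized.items.foldl (fun n kv =>    -- for key, value in list(normalized.items()):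
      if PySem.Str.isIn "_" kv.1 then n.insert (PySem.Str.replace kv.1 "_" ".") kv.2 else n)
    normalized
  normalized.items

-- ===== PORT B =====
def normalize_translation_keys_alt (translations : List (String × String)) : List (String × String) :=
  let d := PySem.Dict.ofList translations                  -- normalized = dict(translations)
  (d.items.foldl (fun r kv =>                              -- for key, value in translations.items():
      if PySem.Str.isIn "_" kv.1 then r.insert (PySem.Str.replace kv.1 "_" ".") kv.2 else r)
    d).items

-- ===== PRECONDITION & SPEC =====
def Spec_normalize_translation_keys (translations : List (String × String)) (out : List (String × String)) : Prop := out = normalize_translation_keys_alt translations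
instance (translations : List (String × String)) (out : List (String × String)) : Decidable (Spec_normalize_translation_keys translations out) := by unfold Spec_normalize_translation_keys; infer_instance

-- ===== CLAIM (what is proved, stated in full; the proofs are below) =====
def Claim_equal_normalize_translation_keys : Prop := ∀ (translations : List (String × String)), Dom_normalize_translation_keys translations → Spec_normalize_translation_keys translations (normalize_translation_keys translations)

-- ===== LEMMAS AND PROOFS =====

-- Rebuilding a dict with unique keys from its own items gives it back.
theorem pv_ofList_items (d : PySem.Dict String String) (hnd : d.keys.Nodup) :
    PySem.Dict.ofList d.items = d := by
  apply PySem.Dict.ext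
  have := PySem.Dict.items_foldl_insert_fresh (d := PySem.Dict.empty) (l := d.items)
    (k := (·.1)) (v := (·.2)) (by simp) hnd
  simpa [PySem.Dict.ofList] using this

-- Re-inserting a pair already present (unique keys) changes nothing.
theorem pv_insert_mem_self (d : PySem.Dict String String) (k v : String)
    (hnd : d.keys.Nodup) (h : (k, v) ∈ d.items) : d.insert k v = d := by
  apply PySem.Dict.ext
  rw [PySem.Dict.items_insert_of_contains _ _ (by
        have := PySem.Dict.mem_keys_of_mem_items d h
        simpa [PySem.Dict.contains_iff_mem_keys] using this)]
  conv_rhs => rw [← List.map_id d.items]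
  apply List.map_congr_left
  intro p hp
  by_cases hk : p.1 = k
  · simp only [hk, beq_self_eq_true, if_true, id]
    have h1 : d.get? k = some v := PySem.Dict.get?_of_mem_items d h hnd
    have h2 : d.get? p.1 = some p.2 := PySem.Dict.get?_of_mem_items d (by simpa using hp) hnd
    rw [hk, h1] at h2
    have hv : v = p.2 := by injection h2
    rw [hv, ← hk]
  · simp [hk]

-- Updating a dict with pairs it already contains (unique keys) is the identity.
theorem pv_update_self (d : PySem.Dict String String) (l : List (String × String))
    (hnd : d.keys.Nodup) (hl : ∀ p ∈ l, p ∈ d.items) : d.update l = d := by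
  induction l with
  | nil => rfl
  | cons p t ih =>
    have h0 : d.update (p :: t) = (d.insert p.1 p.2).update t := rfl
    rw [h0, pv_insert_mem_self d p.1 p.2 hnd (by simpa using hl p (by simp))]
    exact ih (fun q hq => hl q (by simp [hq]))

-- With parent_key = "" on a str-valued dict, flatten_dict rebuilds the same dict.
theorem pv_flatten_id (d : PySem.Dict String String) (hnd : d.keys.Nodup) :
    pvFlattenDict d "" "_" = d := by
  unfold pvFlattenDict
  simp only [ne_eq, not_true_eq_false, if_false]
  rw [show (d.items.foldl (fun items kv => items ++ [(kv.1, kv.2)]) []) = d.items by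
    simpa using PySem.List.foldl_append_singleton_eq_self (l := d.items) (acc := [])]
  exact pv_ofList_items d hnd

-- ===== VERDICT (by name: the statement is the Claim_ definition above) =====
theorem normalize_translation_keys_spec : Claim_equal_normalize_translation_keys := by
  intro translations _
  unfold Spec_normalize_translation_keys
  dsimp only [normalize_translation_keys, normalize_translation_keys_alt]
  have hnd : (PySem.Dict.ofList translations).keys.Nodup := PySem.Dict.nodup_keys_ofList _
  rw [show PySem.Dict.update PySem.Dict.empty (PySem.Dict.ofList translations).items
        = PySem.Dict.ofList (PySem.Dict.ofList translations).items from rfl,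
      pv_ofList_items _ hnd, pv_flatten_id _ hnd,
      pv_update_self _ _ hnd (fun p hp => hp)]
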